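-- pv_equiv track=rewrite | github.com/neptune-ai/neptune-fetcher | src/neptune_fetcher/alpha/internal/attribute.py | _union_options
-- ===== SOURCE A (Python) =====
-- from typing import (
--     Any,
--     Generator,
--     Iterable,
--     List,
--     Literal,
--     Optional,
--     Union,
-- )
--
-- def _union_options(options: list[Optional[list[str]]]) -> Optional[list[str]]:
--     result = None
--
--     for option in options:
--         if option is not None:
--             if result is None:
--                 result = []
--             result.extend(option)
--
--     return result
-- ===== SOURCE B (Python) =====
-- from typing import Optional
--
-- def _union_options(options: list[Optional[list[str]]]) -> Optional[list[str]]: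
--     # Divide and conquer: split in half, recurse on both halves, merge the two
--     # optional results (None is the identity of the merge). Depth O(log n).
--     if len(options) <= 1:
--         o = options[0] if options else None
--         return None if o is None else list(o)
--     mid = len(options) // 2
--     left = _union_options(options[:mid])
--     right = _union_options(options[mid:])
--     if left is None:
--         return right
--     if right is None:
--         return left
--     return left + right
-- ===== Notes on version B (the rewrite author's own statement) =====
-- stated objective: alternative
-- what changed: Replaced the single left-to-right loop threading a None-sentinel accumulator with a divide-and-conquer recursion: split the list in half, recurse on both halves, and merge the two optional results with None as the merge identity (correct because that merge is associative).
import Mathlib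
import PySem

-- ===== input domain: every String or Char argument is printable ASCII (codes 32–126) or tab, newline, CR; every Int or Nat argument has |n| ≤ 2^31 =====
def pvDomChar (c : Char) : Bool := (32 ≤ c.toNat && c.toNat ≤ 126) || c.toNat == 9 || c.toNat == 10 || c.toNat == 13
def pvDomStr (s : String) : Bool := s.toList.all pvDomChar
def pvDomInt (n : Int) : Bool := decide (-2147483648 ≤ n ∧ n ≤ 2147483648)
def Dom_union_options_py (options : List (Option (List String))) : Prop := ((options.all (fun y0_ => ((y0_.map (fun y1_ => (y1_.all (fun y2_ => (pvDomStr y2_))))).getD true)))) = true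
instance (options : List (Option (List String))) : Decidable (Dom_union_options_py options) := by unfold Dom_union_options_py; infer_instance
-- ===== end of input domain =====

-- B replaces A's left-to-right None-sentinel accumulator loop with divide-and-conquer
-- (split in half, recurse, merge the optional results); objective: alternative.

-- ===== PORT A =====
-- literal port of A's loop: accumulator starts as None; a non-None option turns it into a list and extends it
def union_options_py (options : List (Option (List String))) : Option (List String) :=
  options.foldl
    (fun result option =>
      match option with
      | none => result
      | some l => some ((result.getD []) ++ l))
    none

-- ===== PORT B =====
-- 'if left is None: return right; if right is None: return left; return left + right'
def pvMergeOpt (left right : Option (List String)) : Option (List String) :=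
  match left, right with
  | none, r => r
  | some l, none => some l
  | some l, some r => some (l ++ r)

-- divide and conquer as in Source B: base case length ≤ 1, else split at len//2 and merge
def union_options_py_alt (options : List (Option (List String))) : Option (List String) :=
  if h : options.length ≤ 1 then
    match options with
    | [] => none
    | o :: _ => o
  else
    let mid := options.length / 2
    pvMergeOpt (union_options_py_alt (options.take mid))
               (union_options_py_alt (options.drop mid))
termination_by options.length
decreasing_by
  · simp only [List.length_take]; omega
  · simp only [List.length_drop]; omega

-- ===== PRECONDITION & SPEC =====
def Spec_union_options_py (options : List (Option (List String))) (out : Option (List String)) : Prop := out = union_options_py_alt options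
instance (options : List (Option (List String))) (out : Option (List String)) : Decidable (Spec_union_options_py options out) := by unfold Spec_union_options_py; infer_instance

-- ===== CLAIM =====
def Claim_equal_union_options_py : Prop := ∀ (options : List (Option (List String))), Dom_union_options_py options → Spec_union_options_py options (union_options_py options)

-- ===== LEMMAS AND PROOFS =====

-- once A's accumulator is a real list, the rest of the loop merges in the suffix's union
theorem union_options_foldl_some (options : List (Option (List String))) (acc : List String) :
    options.foldl
      (fun result option =>
        match option with
        | none => result
        | some l => some ((result.getD []) ++ l))
      (some acc) = pvMergeOpt (some acc) (union_options_py options) := by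
  induction options generalizing acc with
  | nil => simp [union_options_py, pvMergeOpt]
  | cons o rest ih =>
    cases o with
    | none => simpa [union_options_py, List.foldl] using ih acc
    | some l =>
      simp only [List.foldl, union_options_py]
      rw [ih, ih]
      cases h : union_options_py rest with
      | none => simp [pvMergeOpt]
      | some t => simp [pvMergeOpt, List.append_assoc]

-- A is a homomorphism for list append, with pvMergeOpt the combining operation
theorem union_options_append (xs ys : List (Option (List String))) :
    union_options_py (xs ++ ys) = pvMergeOpt (union_options_py xs) (union_options_py ys) := by
  cases h : union_options_py xs with
  | none =>
    simp only [union_options_py, List.foldl_append]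
    simp only [union_options_py] at h
    rw [h]
    simp [pvMergeOpt]
  | some acc =>
    simp only [union_options_py, List.foldl_append]
    simp only [union_options_py] at h
    rw [h]
    exact union_options_foldl_some ys acc

theorem union_options_eq_bounded :
    ∀ (n : ℕ) (options : List (Option (List String))), options.length ≤ n →
      union_options_py_alt options = union_options_py options := by
  intro n
  induction n with
  | zero =>
    intro options h
    have : options = [] := List.eq_nil_of_length_eq_zero (Nat.le_zero.mp h)
    subst this
    simp [union_options_py_alt, union_options_py]
  | succ n ih =>
    intro options h
    by_cases h1 : options.length ≤ 1
    · match options with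
      | [] => simp [union_options_py_alt, union_options_py]
      | [o] =>
        cases o with
        | none => simp [union_options_py_alt, union_options_py, List.foldl]
        | some l => simp [union_options_py_alt, union_options_py, List.foldl]
      | _ :: _ :: _ => simp at h1
    · rw [union_options_py_alt]
      simp only [h1, dite_false]
      have hlen := options.length
      have htake : (options.take (options.length / 2)).length ≤ n := by
        simp only [List.length_take]; omega
      have hdrop : (options.drop (options.length / 2)).length ≤ n := by
        simp only [List.length_drop]; omega
      rw [ih _ htake, ih _ hdrop, ← union_options_append,
        List.take_append_drop]

theorem union_options_eq (options : List (Option (List String))) :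
    union_options_py options = union_options_py_alt options :=
  (union_options_eq_bounded options.length options le_rfl).symm

-- ===== VERDICT =====
theorem union_options_py_spec : Claim_equal_union_options_py := by
  intro options _
  exact union_options_eq options
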